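-- pv_equiv track=rewrite | github.com/lucas-hattori-costa/HackerRank | scripts/minimal_ammount.py | calculateAmount
-- ===== SOURCE A (Python) =====
-- def calculateAmount(prices):
--     # Write your code here
--     response = 0
--     discount = prices[0]
--     for i, p in enumerate(prices):
--         if i == 0:
--             response+=p
--             continue
--         response += max(p-discount,0)
--         if p<discount:
--             discount = p
--     return response
-- ===== SOURCE B (Python) =====
-- def calculateAmount(prices):
--     # Run-length encoding of record minima: each new strict minimum closes the
--     # previous record's run, charging val * (number of positions it ruled);
--     # the answer is the full total minus the accumulated discount.
--     disc = 0
--     start, val = 1, prices[0]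
--     for i, p in enumerate(prices):
--         if i >= 1 and p < val:
--             disc += val * (i - start)
--             start, val = i, p
--     disc += val * (len(prices) - start)
--     return sum(prices) - disc
-- ===== Notes on version B (the rewrite author's own statement) =====
-- stated objective: alternative
-- what changed: B run-length-encodes the tenure of each successive record minimum (charging val * run-length only when a record is dethroned, plus a final close-out) and returns the full sum minus that discount, instead of A's per-item max(p-discount,0) accumulation.
-- outside the precondition, e.g. on calculateAmount([]): A raises IndexError, B raises IndexError
import Mathlib
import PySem

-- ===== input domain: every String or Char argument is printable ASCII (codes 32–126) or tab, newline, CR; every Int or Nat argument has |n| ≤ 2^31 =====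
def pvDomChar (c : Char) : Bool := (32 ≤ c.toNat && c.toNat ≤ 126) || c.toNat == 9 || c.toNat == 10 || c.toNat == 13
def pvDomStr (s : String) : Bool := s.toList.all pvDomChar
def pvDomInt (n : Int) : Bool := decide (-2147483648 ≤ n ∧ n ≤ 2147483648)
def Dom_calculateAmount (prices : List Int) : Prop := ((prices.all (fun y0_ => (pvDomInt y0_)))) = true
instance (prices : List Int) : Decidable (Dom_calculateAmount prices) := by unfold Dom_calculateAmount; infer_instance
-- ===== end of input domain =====

-- B run-length-encodes the tenure of each record minimum (charging val * run-length on dethronement)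
-- and returns the total sum minus that discount (alternative algorithm; same O(n)).

-- ===== PORT A =====
def calculateAmount (prices : List Int) : Int :=
  let discount := (PySem.List.pyGet? prices 0).getD 0
  ((PySem.List.enumerate prices 0).foldl
    (fun (s : Int × Int) ip =>
      if ip.1 = 0 then (s.1 + ip.2, s.2)
      else
        let r := s.1 + max (ip.2 - s.2) 0
        if ip.2 < s.2 then (r, ip.2) else (r, s.2))
    (0, discount)).1

-- ===== PORT B =====
-- state (disc, start, val) as in Source B
def calculateAmount_alt (prices : List Int) : Int :=
  let val0 := (PySem.List.pyGet? prices 0).getD 0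
  let st := (PySem.List.enumerate prices 0).foldl
    (fun (st : Int × Int × Int) ip =>
      if 1 ≤ ip.1 ∧ ip.2 < st.2.2 then (st.1 + st.2.2 * (ip.1 - st.2.1), ip.1, ip.2) else st)
    (0, 1, val0)
  let disc := st.1 + st.2.2 * ((prices.length : Int) - st.2.1)
  prices.foldl (· + ·) 0 - disc

-- ===== PRECONDITION & SPEC =====
-- Pre_ excludes exactly the empty list, on which Python A raises IndexError (prices[0]); B also raises there.
def Pre_calculateAmount (prices : List Int) : Prop := prices ≠ []
instance (prices : List Int) : Decidable (Pre_calculateAmount prices) := by unfold Pre_calculateAmount; infer_instance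
def pvWitness_calculateAmount : List Int := [10, 3, 7, 1]
def Spec_calculateAmount (prices : List Int) (out : Int) : Prop := out = calculateAmount_alt prices
instance (prices : List Int) (out : Int) : Decidable (Spec_calculateAmount prices out) := by unfold Spec_calculateAmount; infer_instance

-- ===== CLAIM (what is proved, stated in full; the proofs are below) =====
def Claim_equal_calculateAmount : Prop := ∀ (prices : List Int), Dom_calculateAmount prices → Pre_calculateAmount prices → Spec_calculateAmount prices (calculateAmount prices)

-- ===== LEMMAS AND PROOFS =====

-- The common yardstick: the sum of running minima, as a pair fold (current min, accumulated sum).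
def penFold (t : List Int) (m pen : Int) : Int × Int :=
  t.foldl (fun (q : Int × Int) p => (min q.1 p, q.2 + min q.1 p)) (m, pen)

-- A's loop over enumerate with positive start index never takes the i = 0 branch.
theorem foldA_enum (t : List Int) (s : Int) (hs : 1 ≤ s) (r d : Int) :
    (PySem.List.enumerate t s).foldl
      (fun (s : Int × Int) ip =>
        if ip.1 = 0 then (s.1 + ip.2, s.2)
        else if ip.2 < s.2 then (s.1 + max (ip.2 - s.2) 0, ip.2)
        else (s.1 + max (ip.2 - s.2) 0, s.2))
      (r, d)
    = t.foldl
        (fun (s : Int × Int) p =>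
          if p < s.2 then (s.1 + max (p - s.2) 0, p)
          else (s.1 + max (p - s.2) 0, s.2))
        (r, d) := by
  induction t generalizing s r d with
  | nil => simp [PySem.List.enumerate_nil]
  | cons p t ih =>
    rw [PySem.List.enumerate_cons]
    simp only [List.foldl_cons]
    have hne : s ≠ 0 := by omega
    rw [if_neg hne]
    split <;> exact ih (s + 1) (by omega) _ _

-- A's per-item accumulation equals (initial + sum) minus the accumulated running minimum.
theorem main_inv (t : List Int) (r d pen : Int) :
    t.foldl
      (fun (s : Int × Int) p =>
        if p < s.2 then (s.1 + max (p - s.2) 0, p)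
        else (s.1 + max (p - s.2) 0, s.2))
      (r, d)
    = (r + t.sum + pen - (penFold t d pen).2, (penFold t d pen).1) := by
  induction t generalizing r d pen with
  | nil => simp [penFold]
  | cons p t ih =>
    simp only [List.foldl_cons, List.sum_cons, penFold]
    by_cases h : p < d
    · rw [if_pos h]
      have hm : min d p = p := by omega
      rw [hm, ih (r + max (p - d) 0) p (pen + p)]
      simp only [penFold, Prod.mk.injEq]
      exact ⟨by omega, trivial⟩
    · rw [if_neg h]
      have hm : min d p = d := by omega
      rw [hm, ih (r + max (p - d) 0) d (pen + d)]
      simp only [penFold, Prod.mk.injEq]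
      exact ⟨by omega, trivial⟩

-- B's run-length fold, closed out at the end of the list, also accumulates the running-minimum sum.
def bStep (st : Int × Int × Int) (ip : Int × Int) : Int × Int × Int :=
  if 1 ≤ ip.1 ∧ ip.2 < st.2.2 then (st.1 + st.2.2 * (ip.1 - st.2.1), ip.1, ip.2) else st

theorem bStep_eq (l : List (Int × Int)) (st0 : Int × Int × Int) :
    l.foldl
      (fun (st : Int × Int × Int) ip =>
        if 1 ≤ ip.1 ∧ ip.2 < st.2.2 then (st.1 + st.2.2 * (ip.1 - st.2.1), ip.1, ip.2) else st)
      st0 = l.foldl bStep st0 := rfl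

theorem foldB_enum (t : List Int) (s : Int) (hs : 1 ≤ s) (disc start val pen : Int) :
    ((PySem.List.enumerate t s).foldl bStep (disc, start, val)).1
      + ((PySem.List.enumerate t s).foldl bStep (disc, start, val)).2.2
        * (s + (t.length : Int) - ((PySem.List.enumerate t s).foldl bStep (disc, start, val)).2.1)
      + pen
    = disc + val * (s - start) + (penFold t val pen).2 := by
  induction t generalizing s disc start val pen with
  | nil => simp [PySem.List.enumerate_nil, penFold]
  | cons p t ih =>
    rw [PySem.List.enumerate_cons]
    simp only [List.foldl_cons, List.length_cons, penFold]
    by_cases h : p < val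
    · rw [show bStep (disc, start, val) (s, p) = (disc + val * (s - start), s, p) from by
        simp [bStep, hs, h]]
      have hm : min val p = p := by omega
      rw [hm]
      have := ih (s + 1) (by omega) (disc + val * (s - start)) s p (pen + p)
      simp only [penFold] at this
      push_cast at this ⊢
      linarith [this]
    · rw [show bStep (disc, start, val) (s, p) = (disc, start, val) from by
        simp only [bStep, if_neg (fun hc : 1 ≤ s ∧ p < val => h hc.2)]]
      have hm : min val p = val := by omega
      rw [hm]
      have := ih (s + 1) (by omega) disc start val (pen + val)
      simp only [penFold] at this
      push_cast at this ⊢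
      linarith [this]

theorem foldl_add_sum (t : List Int) (a : Int) : t.foldl (· + ·) a = a + t.sum := by
  induction t generalizing a with
  | nil => simp
  | cons p t ih => simp only [List.foldl_cons, List.sum_cons, ih]; ring

-- ===== VERDICT (by name: the statement is the Claim_ definition above) =====
theorem calculateAmount_spec : Claim_equal_calculateAmount := by
  intro prices _ hpre
  match prices with
  | [] => exact absurd rfl hpre
  | h :: t =>
    show calculateAmount (h :: t) = calculateAmount_alt (h :: t)
    unfold calculateAmount calculateAmount_alt
    simp only [foldl_add_sum, List.sum_cons, List.length_cons, PySem.List.pyGet?,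
      PySem.List.pyIdx?, bStep_eq]
    rw [PySem.List.enumerate_cons]
    simp only [List.foldl_cons]
    norm_num
    rw [foldA_enum t 1 le_rfl, main_inv t h h 0]
    rw [show bStep (0, 1, h) ((0 : Int), h) = (0, 1, h) from by simp [bStep]]
    have hB := foldB_enum t 1 le_rfl 0 1 h 0
    simp only [penFold] at hB ⊢
    linarith [hB]
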